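-- pv_equiv track=rewrite | github.com/paiml/depyler | examples/hard_final_lang_lambda.py | term_size
-- ===== SOURCE A (Python) =====
-- def term_size(term: list[int]) -> int:
--     """Count number of nodes in term."""
--     tag: int = term[0]
--     if tag == 0:
--         return 1
--     if tag == 1:
--         blen: int = term[1]
--         body: list[int] = []
--         i: int = 0
--         while i < blen:
--             bv: int = term[2 + i]
--             body.append(bv)
--             i = i + 1
--         return 1 + term_size(body)
--     if tag == 2:
--         flen: int = term[1]
--         alen: int = term[2]
--         func_term: list[int] = []
--         i2: int = 0
--         while i2 < flen:
--             fv: int = term[3 + i2]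
--             func_term.append(fv)
--             i2 = i2 + 1
--         arg_term: list[int] = []
--         j: int = 0
--         while j < alen:
--             av: int = term[3 + flen + j]
--             arg_term.append(av)
--             j = j + 1
--         return 1 + term_size(func_term) + term_size(arg_term)
--     return 1
-- ===== SOURCE B (Python) =====
-- def term_size(term: list[int]) -> int:
--     """Count number of nodes in term (index-based walk, no sublist copies)."""
--     def size(i: int) -> int:
--         tag = term[i]
--         if tag == 0:
--             return 1
--         if tag == 1:
--             return 1 + size(i + 2)
--         if tag == 2:
--             return 1 + size(i + 3) + size(i + 3 + term[i + 1])
--         return 1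
--     return size(0)
-- ===== Notes on version B (the rewrite author's own statement) =====
-- stated objective: alternative
-- what changed: B walks the flat encoding in place by index offsets (recursing on positions, using the declared-length fields to jump to subterm starts) instead of copying each subterm into a fresh list element-by-element before recursing.
import Mathlib
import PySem

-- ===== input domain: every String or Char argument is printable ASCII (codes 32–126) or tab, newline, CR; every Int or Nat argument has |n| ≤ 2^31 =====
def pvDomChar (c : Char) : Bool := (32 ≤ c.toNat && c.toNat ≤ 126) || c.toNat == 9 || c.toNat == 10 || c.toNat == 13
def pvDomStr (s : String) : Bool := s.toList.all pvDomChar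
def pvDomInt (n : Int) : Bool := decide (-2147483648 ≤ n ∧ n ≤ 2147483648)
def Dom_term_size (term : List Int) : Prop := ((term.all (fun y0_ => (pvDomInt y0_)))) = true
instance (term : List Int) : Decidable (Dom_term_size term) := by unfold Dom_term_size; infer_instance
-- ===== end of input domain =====

-- B walks the flat encoding in place by index offsets instead of copying each subterm into
-- a fresh list before recursing (objective: alternative; return value only, no mutation).

-- ===== PORT A =====
-- Literal port of A. Python's term[j] raises IndexError out of range; pyGetD's default 0 is
-- read only outside Pre_term_size, which excludes exactly the inputs where A raises. The
-- fuel argument only makes the recursion total in Lean; within Pre_ it never runs out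
-- (proved below), outside Pre_ nothing is claimed.
def term_sizeA (fuel : Nat) (term : List Int) : Int :=
  match fuel with
  | 0 => 0
  | fuel + 1 =>
    let tag : Int := PySem.List.pyGetD term 0 0
    if tag = 0 then 1
    else if tag = 1 then
      let blen : Int := PySem.List.pyGetD term 1 0
      let body : List Int :=
        (PySem.List.pyRange 0 blen 1).foldl
          (fun acc i => acc ++ [PySem.List.pyGetD term (2 + i) 0]) []
      1 + term_sizeA fuel body
    else if tag = 2 then
      let flen : Int := PySem.List.pyGetD term 1 0
      let alen : Int := PySem.List.pyGetD term 2 0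
      let func_term : List Int :=
        (PySem.List.pyRange 0 flen 1).foldl
          (fun acc i2 => acc ++ [PySem.List.pyGetD term (3 + i2) 0]) []
      let arg_term : List Int :=
        (PySem.List.pyRange 0 alen 1).foldl
          (fun acc j => acc ++ [PySem.List.pyGetD term (3 + flen + j) 0]) []
      1 + term_sizeA fuel func_term + term_sizeA fuel arg_term
    else 1

def term_size (term : List Int) : Int := term_sizeA (term.length + 1) term

-- ===== PORT B =====
-- Port of Source B's inner `size(i)`: recursion on the index, same fuel convention as above.
def sizeB (term : List Int) : Nat → Int → Int
  | 0, _ => 0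
  | fuel + 1, i =>
    let tag : Int := PySem.List.pyGetD term i 0
    if tag = 0 then 1
    else if tag = 1 then 1 + sizeB term fuel (i + 2)
    else if tag = 2 then
      1 + sizeB term fuel (i + 3) + sizeB term fuel (i + 3 + PySem.List.pyGetD term (i + 1) 0)
    else 1

def term_size_alt (term : List Int) : Int := sizeB term (term.length + 1) 0

-- ===== PRECONDITION & SPEC =====
-- The natural domain is the grammar of valid length-prefixed encodings, which is inherently
-- recursive; wf is that grammar as a predicate on the input (shape and bound checks on the
-- length fields, recursing on the delimited slices — it computes no sizes and copies neither
-- port's algorithm; the fuel only makes it kernel-reducible, length+1 always suffices).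
-- wf t = true exactly when Python A returns normally on t (an empty (sub)term, a missing or
-- negative length field, or a length field pointing past the end makes A raise IndexError).
def wf : Nat → List Int → Bool
  | 0, _ => false
  | fuel + 1, t =>
    match t with
    | [] => false
    | tag :: rest =>
      if tag = 0 then true
      else if tag = 1 then
        match rest with
        | [] => false
        | blen :: rest2 =>
          decide (0 ≤ blen) && decide (blen ≤ (rest2.length : Int)) &&
          wf fuel (rest2.take blen.toNat)
      else if tag = 2 then
        match rest with
        | flen :: alen :: rest3 =>
          decide (0 ≤ flen) && decide (0 ≤ alen) && decide (flen + alen ≤ (rest3.length : Int)) &&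
          wf fuel (rest3.take flen.toNat) && wf fuel ((rest3.drop flen.toNat).take alen.toNat)
        | _ => false
      else true

-- Pre_ excludes exactly the inputs on which Python A raises IndexError (nothing more).
def Pre_term_size (term : List Int) : Prop := wf (term.length + 1) term = true
instance (term : List Int) : Decidable (Pre_term_size term) := by
  unfold Pre_term_size; infer_instance

def pvWitness_term_size : List Int := [2, 1, 1, 0, 0]

def Spec_term_size (term : List Int) (out : Int) : Prop := out = term_size_alt term
instance (term : List Int) (out : Int) : Decidable (Spec_term_size term out) := by
  unfold Spec_term_size; infer_instance

-- ===== CLAIM (what is proved, stated in full; the proofs are below) =====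
def Claim_equal_term_size : Prop :=
  ∀ (term : List Int), Dom_term_size term → Pre_term_size term →
    Spec_term_size term (term_size term)

-- ===== LEMMAS AND PROOFS =====

-- The append-loop of A builds exactly the contiguous slice it reads.
lemma build_slice (xs : List Int) (c n : Int) (hc : 0 ≤ c) (_hn : 0 ≤ n)
    (h : c + n ≤ (xs.length : Int)) :
    (PySem.List.pyRange 0 n 1).map (fun i => PySem.List.pyGetD xs (c + i) 0) =
      (xs.drop c.toNat).take n.toNat := by
  apply List.ext_getElem
  · simp [PySem.List.length_pyRange_one]; omega
  · intro k hk1 hk2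
    simp only [List.getElem_map, PySem.List.getElem_pyRange_one]
    have hk : k < n.toNat := by
      simpa [PySem.List.length_pyRange_one] using hk1
    have hidx : c + (0 + (k : Int)) = ((c.toNat + k : Nat) : Int) := by omega
    rw [hidx, PySem.List.pyGetD_natCast]
    have hlt : c.toNat + k < xs.length := by omega
    rw [List.getD_eq_getElem _ _ hlt]
    rw [List.getElem_take, List.getElem_drop]

-- inversion of wf on each constructor shape
lemma wf_one (f : Nat) (rest : List Int) (h : wf (f + 1) (1 :: rest) = true) :
    ∃ blen rest2, rest = blen :: rest2 ∧ 0 ≤ blen ∧ blen ≤ (rest2.length : Int) ∧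
      wf f (rest2.take blen.toNat) = true := by
  cases rest with
  | nil => simp [wf] at h
  | cons blen rest2 =>
    simp only [wf] at h
    norm_num at h
    exact ⟨blen, rest2, rfl, h.1.1, h.1.2, h.2⟩

lemma wf_two (f : Nat) (rest : List Int) (h : wf (f + 1) (2 :: rest) = true) :
    ∃ flen alen rest3, rest = flen :: alen :: rest3 ∧ 0 ≤ flen ∧ 0 ≤ alen ∧
      flen + alen ≤ (rest3.length : Int) ∧ wf f (rest3.take flen.toNat) = true ∧
      wf f ((rest3.drop flen.toNat).take alen.toNat) = true := by
  match rest with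
  | [] => simp [wf] at h
  | [_] => simp [wf] at h
  | flen :: alen :: rest3 =>
    simp only [wf] at h
    norm_num at h
    exact ⟨flen, alen, rest3, rfl, h.1.1.1.1, h.1.1.1.2, h.1.1.2, h.1.2, h.2⟩

lemma keyAB : ∀ (fa : Nat) (t full : List Int) (base : Nat) (fb : Nat),
    wf fa t = true → t.length < fb →
    (∀ k : Nat, k < t.length → full[base + k]? = t[k]?) →
    term_sizeA fa t = sizeB full fb (base : Int) := by
  intro fa
  induction fa with
  | zero => intro t _ _ _ hwf _ _; simp [wf] at hwf
  | succ fa ih =>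
    intro t full base fb hwf hfb hk
    obtain ⟨fb, rfl⟩ : ∃ fb', fb = fb' + 1 := ⟨fb - 1, by omega⟩
    match t, hwf with
    | [], hwf => simp [wf] at hwf
    | tag :: rest, hwf =>
    have htag : PySem.List.pyGetD full (base : Int) 0 = tag := by
      have := hk 0 (by simp)
      simp at this
      simp [PySem.List.pyGetD_natCast, List.getD_eq_getElem?_getD, this]
    by_cases h0 : tag = 0
    · subst h0
      simp [term_sizeA, sizeB, htag]
    · by_cases h1 : tag = 1
      · subst h1
        obtain ⟨blen, rest2, rfl, hb0, hble, hwfb⟩ := wf_one fa rest hwf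
        · have hbody :
              (PySem.List.pyRange 0 blen 1).foldl
                (fun acc i => acc ++ [PySem.List.pyGetD (1 :: blen :: rest2) (2 + i) 0]) [] =
              rest2.take blen.toNat := by
            rw [PySem.List.foldl_append_singleton_eq_map, List.nil_append]
            have := build_slice (1 :: blen :: rest2) 2 blen (by norm_num) hb0
              (by simp; omega)
            simpa using this
          have hlen : (rest2.take blen.toNat).length = blen.toNat := by
            simp [List.length_take]; omega
          have hrec : term_sizeA fa (rest2.take blen.toNat) = sizeB full fb ((base + 2 : Nat) : Int) := by
            apply ih _ full (base + 2) fb hwfb (by simp only [List.length_cons, List.length_take] at hfb ⊢; omega)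
            intro k hkl
            rw [hlen] at hkl
            have h2 : (rest2.take blen.toNat)[k]? = rest2[k]? := by
              rw [List.getElem?_take]; simp [hkl]
            have h3 : rest2[k]? = (1 :: blen :: rest2)[k + 2]? := by simp
            have h4 : base + 2 + k = base + (k + 2) := by omega
            rw [h2, h3, h4, hk (k + 2) (by simp; omega)]
          have hblen : PySem.List.pyGetD full ((base : Int) + 1) 0 = blen := by
            have := hk 1 (by simp)
            have hcast : (base : Int) + 1 = ((base + 1 : Nat) : Int) := by omega
            simp at this
            rw [hcast, PySem.List.pyGetD_natCast, List.getD_eq_getElem?_getD, this]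
            simp
          have hA1 : PySem.List.pyGetD (1 :: blen :: rest2) 1 0 = blen := by simp [pysem]
          have e1 : (base : Int) + 2 = ((base + 2 : Nat) : Int) := by omega
          simp only [term_sizeA, sizeB, htag, hblen, hA1, hbody, hrec, e1]
          norm_num
      · by_cases h2 : tag = 2
        · subst h2
          obtain ⟨flen, alen, rest3, rfl, hf0, ha0, hfa', hwff, hwfa⟩ := wf_two fa rest hwf
          · have hflen : PySem.List.pyGetD full ((base : Int) + 1) 0 = flen := by
              have := hk 1 (by simp)
              have hcast : (base : Int) + 1 = ((base + 1 : Nat) : Int) := by omega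
              simp at this
              rw [hcast, PySem.List.pyGetD_natCast, List.getD_eq_getElem?_getD, this]
              simp
            have hfunc :
                (PySem.List.pyRange 0 flen 1).foldl
                  (fun acc i2 => acc ++ [PySem.List.pyGetD (2 :: flen :: alen :: rest3) (3 + i2) 0]) [] =
                rest3.take flen.toNat := by
              rw [PySem.List.foldl_append_singleton_eq_map, List.nil_append]
              have := build_slice (2 :: flen :: alen :: rest3) 3 flen (by norm_num) hf0
                (by simp; omega)
              simpa using this
            have harg :
                (PySem.List.pyRange 0 alen 1).foldl
                  (fun acc j => acc ++ [PySem.List.pyGetD (2 :: flen :: alen :: rest3) (3 + flen + j) 0]) [] =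
                (rest3.drop flen.toNat).take alen.toNat := by
              rw [PySem.List.foldl_append_singleton_eq_map, List.nil_append]
              have := build_slice (2 :: flen :: alen :: rest3) (3 + flen) alen
                (by omega) ha0 (by simp; omega)
              have hdrop : (2 :: flen :: alen :: rest3).drop (3 + flen).toNat =
                  rest3.drop flen.toNat := by
                rw [show (3 + flen).toNat = flen.toNat + 1 + 1 + 1 from by omega,
                  List.drop_succ_cons, List.drop_succ_cons, List.drop_succ_cons]
              rw [hdrop] at this
              simpa using this
            have hlenf : (rest3.take flen.toNat).length = flen.toNat := by
              simp [List.length_take]; omega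
            have hlena : ((rest3.drop flen.toNat).take alen.toNat).length = alen.toNat := by
              simp [List.length_take, List.length_drop]; omega
            have hrecf : term_sizeA fa (rest3.take flen.toNat) =
                sizeB full fb ((base + 3 : Nat) : Int) := by
              apply ih _ full (base + 3) fb hwff (by simp only [List.length_cons, List.length_take] at hfb ⊢; omega)
              intro k hkl
              rw [hlenf] at hkl
              have ha : (rest3.take flen.toNat)[k]? = rest3[k]? := by
                rw [List.getElem?_take]; simp [hkl]
              have hb : rest3[k]? = (2 :: flen :: alen :: rest3)[k + 3]? := by simp
              have hc : base + 3 + k = base + (k + 3) := by omega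
              rw [ha, hb, hc, hk (k + 3) (by simp; omega)]
            have hreca : term_sizeA fa ((rest3.drop flen.toNat).take alen.toNat) =
                sizeB full fb ((base + 3 + flen.toNat : Nat) : Int) := by
              apply ih _ full (base + 3 + flen.toNat) fb hwfa
                (by simp only [List.length_cons, List.length_take, List.length_drop] at hfb ⊢; omega)
              intro k hkl
              rw [hlena] at hkl
              have ha : ((rest3.drop flen.toNat).take alen.toNat)[k]? =
                  rest3[flen.toNat + k]? := by
                rw [List.getElem?_take]; simp [hkl, List.getElem?_drop]
              have hb : rest3[flen.toNat + k]? = (2 :: flen :: alen :: rest3)[flen.toNat + k + 3]? := by simp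
              have hc : base + 3 + flen.toNat + k = base + (flen.toNat + k + 3) := by omega
              rw [ha, hb, hc, hk (flen.toNat + k + 3) (by simp; omega)]
            have hA1 : PySem.List.pyGetD (2 :: flen :: alen :: rest3) 1 0 = flen := by
              simp [pysem]
            have hA2 : PySem.List.pyGetD (2 :: flen :: alen :: rest3) 2 0 = alen := by
              simp [pysem]
            have e1 : (base : Int) + 3 = ((base + 3 : Nat) : Int) := by omega
            have e2 : (base : Int) + 3 + flen = ((base + 3 + flen.toNat : Nat) : Int) := by omega
            simp only [term_sizeA, sizeB, htag, hflen, hA1, hA2, hfunc, harg, hrecf, hreca, e1]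
            norm_num
            congr 1
            omega
        · simp [term_sizeA, sizeB, htag, h0, h1, h2]

-- ===== VERDICT (by name: the statement is the Claim_ definition above) =====
theorem term_size_spec : Claim_equal_term_size := by
  intro term _ hpre
  unfold Spec_term_size term_size term_size_alt
  exact keyAB (term.length + 1) term term 0 (term.length + 1) hpre (by omega)
    (fun k hkl => by simp)
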